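-- pv_equiv track=rewrite | github.com/thelittlelamb/CS61A_Fall_2020 | Homework/hw05/hw05.py | split_first_number
-- ===== SOURCE A (Python) =====
-- def split_first_number(n):
--     """Split a non-negative number N into its first digit and the rest digits."""
--     first, rest = n, 0
--     digits = 1
--     while first >= 10:
--         remainder = first % 10
--         rest += remainder * digits
--         digits *= 10
--         first //= 10
--     return first, rest
-- ===== SOURCE B (Python) =====
-- def _magnitude(n):
--     """Largest power of 10 not exceeding n's magnitude (1 if n < 10)."""
--     if n < 10:
--         return 1
--     return 10 * _magnitude(n // 10)
--
-- def split_first_number(n):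
--     """Split a non-negative number N into its first digit and the rest digits."""
--     divisor = _magnitude(n)
--     return n // divisor, n % divisor
-- ===== Notes on version B (the rewrite author's own statement) =====
-- stated objective: alternative
-- what changed: Instead of peeling digits in a loop while reconstructing the rest with an accumulated place-value multiplier, B recursively computes the magnitude divisor (largest power of ten <= n) and obtains first digit and rest with a single divmod n//divisor, n%divisor.
import Mathlib
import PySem

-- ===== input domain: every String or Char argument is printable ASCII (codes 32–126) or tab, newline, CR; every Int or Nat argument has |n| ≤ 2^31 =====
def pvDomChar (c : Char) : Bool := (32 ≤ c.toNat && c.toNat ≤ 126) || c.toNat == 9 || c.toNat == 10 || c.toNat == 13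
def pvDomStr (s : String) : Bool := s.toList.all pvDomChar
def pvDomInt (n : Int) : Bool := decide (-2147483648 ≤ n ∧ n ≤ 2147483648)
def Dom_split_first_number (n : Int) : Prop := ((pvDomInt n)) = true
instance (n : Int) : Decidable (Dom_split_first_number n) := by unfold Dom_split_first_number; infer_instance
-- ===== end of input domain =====

-- B replaces A's digit-peeling loop (which rebuilds the rest with an accumulated
-- place-value multiplier) by a recursive magnitude computation plus one divmod.

-- ===== PORT A =====
-- A's while loop as structural recursion over the state (first, rest, digits).
def splitA_loop (first rest digits : Int) : Int × Int :=
  if _h : 10 ≤ first then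
    splitA_loop (PySem.Int.floordiv first 10)
      (rest + PySem.Int.mod first 10 * digits) (digits * 10)
  else
    (first, rest)
termination_by first.toNat
decreasing_by
  rw [PySem.Int.floordiv_eq_ediv_of_pos (by norm_num)]
  omega

def split_first_number (n : Int) : Int × Int :=
  splitA_loop n 0 1

-- ===== PORT B =====
-- _magnitude from Source B: 1 if n < 10 else 10 * _magnitude(n // 10)
def pvMagnitude (n : Int) : Int :=
  if n < 10 then 1
  else 10 * pvMagnitude (PySem.Int.floordiv n 10)
termination_by n.toNat
decreasing_by
  rw [PySem.Int.floordiv_eq_ediv_of_pos (by norm_num)]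
  omega

def split_first_number_alt (n : Int) : Int × Int :=
  (PySem.Int.floordiv n (pvMagnitude n), PySem.Int.mod n (pvMagnitude n))

-- ===== PRECONDITION & SPEC =====
def Spec_split_first_number (n : Int) (out : Int × Int) : Prop := out = split_first_number_alt n
instance (n : Int) (out : Int × Int) : Decidable (Spec_split_first_number n out) := by unfold Spec_split_first_number; infer_instance

-- ===== CLAIM (what is proved, stated in full; the proofs are below) =====
def Claim_equal_split_first_number : Prop := ∀ (n : Int), Dom_split_first_number n → Spec_split_first_number n (split_first_number n)

-- ===== LEMMAS AND PROOFS =====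
theorem pvMagnitude_pos (n : Int) : 0 < pvMagnitude n := by
  unfold pvMagnitude
  split
  · norm_num
  · have := pvMagnitude_pos (PySem.Int.floordiv n 10)
    omega
termination_by n.toNat
decreasing_by
  rw [PySem.Int.floordiv_eq_ediv_of_pos (by norm_num)]
  omega

-- Characterisation of A's loop in terms of B's magnitude divisor.
theorem splitA_loop_eq (first : Int) : ∀ rest digits : Int,
    splitA_loop first rest digits =
      (PySem.Int.floordiv first (pvMagnitude first),
       rest + PySem.Int.mod first (pvMagnitude first) * digits) := by
  intro rest digits
  by_cases h : 10 ≤ first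
  · have hm := pvMagnitude_pos (PySem.Int.floordiv first 10)
    have h10 : (0:Int) < 10 := by norm_num
    have hqe : PySem.Int.floordiv first 10 = first / 10 :=
      PySem.Int.floordiv_eq_ediv_of_pos h10
    have hmag : pvMagnitude first = 10 * pvMagnitude (PySem.Int.floordiv first 10) := by
      rw [pvMagnitude]; exact if_neg (by omega)
    rw [splitA_loop, dif_pos h, splitA_loop_eq (PySem.Int.floordiv first 10), hmag, hqe]
    rw [hqe] at hm
    set m := pvMagnitude (first / 10) with hmdef
    have hpos : (0:Int) < 10 * m := by positivity
    rw [PySem.Int.floordiv_eq_ediv_of_pos hm, PySem.Int.mod_eq_emod_of_pos hm,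
        PySem.Int.mod_eq_emod_of_pos h10,
        PySem.Int.floordiv_eq_ediv_of_pos hpos, PySem.Int.mod_eq_emod_of_pos hpos]
    have hdiv : first / 10 / m = first / (10 * m) :=
      Int.ediv_ediv_of_nonneg (by norm_num)
    rw [Prod.mk.injEq]
    constructor
    · exact hdiv
    · have e1 : first % (10 * m) = first - 10 * m * (first / (10 * m)) := by
        rw [Int.emod_def]
      have e2 : first / 10 % m = first / 10 - m * (first / 10 / m) := by
        rw [Int.emod_def]
      have e3 : first % 10 = first - 10 * (first / 10) := by
        rw [Int.emod_def]
      rw [e1, e2, e3, ← hdiv]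
      ring
  · rw [splitA_loop, dif_neg h, pvMagnitude, if_pos (by omega)]
    have : PySem.Int.floordiv first 1 = first := by
      rw [PySem.Int.floordiv_eq_ediv_of_pos (by norm_num), Int.ediv_one]
    have hmod : PySem.Int.mod first 1 = 0 := by
      rw [PySem.Int.mod_eq_emod_of_pos (by norm_num), Int.emod_one]
    rw [this, hmod]
    ring_nf
termination_by first.toNat
decreasing_by
  rw [PySem.Int.floordiv_eq_ediv_of_pos (by norm_num)]
  omega

-- ===== VERDICT (by name: the statement is the Claim_ definition above) =====
theorem split_first_number_spec : Claim_equal_split_first_number := by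
  intro n _
  unfold Spec_split_first_number split_first_number split_first_number_alt
  rw [splitA_loop_eq]
  simp
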